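-- pv_equiv track=rewrite | github.com/ksee1230/Algorithm | programmers/camouflage.py | solution
-- ===== SOURCE A (Python) =====
-- def solution(clothes):
--     answer = 1
--     countClothes = dict()
--     for name, kind in clothes:
--         if kind in countClothes:
--             countClothes[kind] += 1
--         else:
--             countClothes[kind] = 2
--     for val in countClothes.values():
--         answer *= val
--     return answer - 1
-- ===== SOURCE B (Python) =====
-- def solution(clothes):
--     kinds = sorted(kind for _, kind in clothes)
--     product = 1
--     i = 0
--     n = len(kinds)
--     while i < n:
--         j = i + 1
--         while j < n and kinds[j] == kinds[i]:
--             j += 1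
--         product *= (j - i + 1)
--         i = j
--     return product - 1
-- ===== Notes on version B (the rewrite author's own statement) =====
-- stated objective: alternative
-- what changed: Replaces the dict-counting pass and values-product loop with a sort of the kinds followed by a single scan over consecutive equal runs, multiplying (run length + 1) per run.
import Mathlib
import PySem

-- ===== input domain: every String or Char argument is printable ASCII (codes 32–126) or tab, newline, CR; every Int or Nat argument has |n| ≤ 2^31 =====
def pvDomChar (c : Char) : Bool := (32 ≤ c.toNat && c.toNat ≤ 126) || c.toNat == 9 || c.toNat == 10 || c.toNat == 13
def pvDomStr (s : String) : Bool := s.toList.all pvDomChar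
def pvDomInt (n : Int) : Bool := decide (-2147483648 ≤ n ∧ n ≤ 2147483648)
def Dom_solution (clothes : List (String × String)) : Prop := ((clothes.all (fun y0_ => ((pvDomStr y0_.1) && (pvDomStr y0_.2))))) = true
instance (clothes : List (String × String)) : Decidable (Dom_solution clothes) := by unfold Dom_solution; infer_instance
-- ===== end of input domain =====

-- B replaces A's dict-counting pass with a sort of the kinds followed by a single
-- scan over consecutive equal runs (alternative decomposition, not claimed faster).

-- ===== PORT A =====
def solution (clothes : List (String × String)) : Int :=
  let countClothes : PySem.Dict String Int :=
    clothes.foldl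
      (fun d p =>
        if d.contains p.2 then d.modify p.2 0 (· + 1) else d.insert p.2 2)
      PySem.Dict.empty
  let answer : Int := countClothes.values.foldl (fun a v => a * v) 1
  answer - 1

-- ===== PORT B =====
-- B's outer while loop: one run (inner while = the takeWhile length) per step,
-- multiply (run length + 1) and continue after the run (dropWhile).
def runScan : List String → Int
  | [] => 1
  | x :: rest =>
      (((rest.takeWhile (fun y => y == x)).length : Int) + 2) *
        runScan (rest.dropWhile (fun y => y == x))
termination_by l => l.length
decreasing_by
  exact Nat.lt_succ_of_le (List.length_dropWhile_le _ _)

def solution_alt (clothes : List (String × String)) : Int :=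
  runScan (PySem.List.sorted (clothes.map (·.2)) (fun k => k) false) - 1

-- ===== PRECONDITION & SPEC =====
def Spec_solution (clothes : List (String × String)) (out : Int) : Prop := out = solution_alt clothes
instance (clothes : List (String × String)) (out : Int) : Decidable (Spec_solution clothes out) := by unfold Spec_solution; infer_instance

-- ===== CLAIM (what is proved, stated in full; the proofs are below) =====
def Claim_equal_solution : Prop := ∀ (clothes : List (String × String)), Dom_solution clothes → Spec_solution clothes (solution clothes)

-- ===== LEMMAS AND PROOFS =====

-- the common abstraction: product over the distinct kinds of (count + 1)
def kindProd (l : List String) : Int :=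
  ((PySem.List.dedup l).map (fun k => (l.count k : Int) + 1)).prod

-- A's loop step, over the kind only
def stepA (d : PySem.Dict String Int) (x : String) : PySem.Dict String Int :=
  if d.contains x then d.modify x 0 (· + 1) else d.insert x 2

lemma stepA_contains (d : PySem.Dict String Int) (x k : String) :
    (stepA d x).contains k = (k == x || d.contains k) := by
  unfold stepA
  split_ifs with h
  · exact PySem.Dict.contains_modify d x k 0 _
  · exact PySem.Dict.contains_insert d x k 2

lemma foldl_stepA_getD (ks : List String) :
    ∀ (d : PySem.Dict String Int) (k : String),
      (ks.foldl stepA d).getD k 0 =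
        d.getD k 0 + ks.count k +
          (if d.contains k = false ∧ k ∈ ks then 1 else 0) := by
  induction ks with
  | nil => intro d k; simp
  | cons x t ih =>
    intro d k
    rw [List.foldl_cons, ih (stepA d x) k]
    by_cases hk : k = x
    · subst hk
      by_cases hc : d.contains k = true
      · have h1 : (stepA d k).getD k 0 = d.getD k 0 + 1 := by
          simp [stepA, hc, PySem.Dict.getD_modify_self]
        rw [h1, stepA_contains]
        simp [hc]
        ring
      · have hc' : d.contains k = false := by
          cases h : d.contains k
          · rfl
          · exact absurd h hc
        have h1 : (stepA d k).getD k 0 = 2 := by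
          simp [stepA, hc', PySem.Dict.getD_insert_self]
        rw [h1, stepA_contains]
        rw [PySem.Dict.getD_of_not_contains d 0 hc']
        simp [hc']
        ring
    · have h1 : (stepA d x).getD k 0 = d.getD k 0 := by
        unfold stepA
        split_ifs with h
        · exact PySem.Dict.getD_modify_of_ne d 0 _ hk
        · exact PySem.Dict.getD_insert_of_ne d 0 (v := 2) hk
      have h2 : (stepA d x).contains k = d.contains k := by
        rw [stepA_contains]; simp [hk]
      rw [h1, h2]
      have hbk : (x == k) = false := by
        simp [beq_eq_false_iff_ne]; exact fun h => hk h.symm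
      simp [List.count_cons, hbk, hk]

lemma foldl_stepA_mem_keys (ks : List String) :
    ∀ (d : PySem.Dict String Int) (k : String),
      k ∈ (ks.foldl stepA d).keys ↔ k ∈ d.keys ∨ k ∈ ks := by
  induction ks with
  | nil => intro d k; simp
  | cons x t ih =>
    intro d k
    rw [List.foldl_cons, ih (stepA d x) k]
    have hkeys : k ∈ (stepA d x).keys ↔ k = x ∨ k ∈ d.keys := by
      unfold stepA
      split_ifs with h
      · rw [PySem.Dict.keys_modify, PySem.Dict.mem_keys_insert]
      · rw [PySem.Dict.mem_keys_insert]
    rw [hkeys]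
    constructor
    · rintro ((h | h) | h)
      · exact Or.inr (by simp [h])
      · exact Or.inl h
      · exact Or.inr (by simp [h])
    · rintro (h | h)
      · exact Or.inl (Or.inr h)
      · rcases List.mem_cons.mp h with h | h
        · exact Or.inl (Or.inl h)
        · exact Or.inr h

lemma foldl_stepA_nodup_keys (ks : List String) :
    ∀ (d : PySem.Dict String Int), d.keys.Nodup → (ks.foldl stepA d).keys.Nodup := by
  induction ks with
  | nil => intro d hd; simpa using hd
  | cons x t ih =>
    intro d hd
    rw [List.foldl_cons]
    refine ih (stepA d x) ?_
    unfold stepA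
    split_ifs with h
    · rw [PySem.Dict.keys_modify]
      exact PySem.Dict.nodup_keys_insert d x _ hd
    · exact PySem.Dict.nodup_keys_insert d x 2 hd

-- kindProd through an arbitrary nodup enumeration of the distinct elements
lemma kindProd_eq_of (l : List String) (ds : List String)
    (h1 : ds.Nodup) (h2 : ∀ k, k ∈ ds ↔ k ∈ l) :
    kindProd l = (ds.map (fun k => (l.count k : Int) + 1)).prod := by
  have hperm : (PySem.List.dedup l).Perm ds := by
    rw [List.perm_ext_iff_of_nodup (PySem.List.nodup_dedup l) h1]
    intro a
    rw [PySem.List.mem_dedup, h2]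
  exact (hperm.map (fun k => (l.count k : Int) + 1)).prod_eq

lemma kindProd_perm {l l' : List String} (h : l.Perm l') : kindProd l = kindProd l' := by
  rw [kindProd_eq_of l (PySem.List.dedup l') (PySem.List.nodup_dedup l')
    (fun k => by rw [PySem.List.mem_dedup]; exact h.symm.mem_iff)]
  unfold kindProd
  congr 1
  exact List.map_congr_left (fun a _ => by rw [h.count_eq])

-- A computes kindProd of the kinds, minus 1
lemma solution_eq_kindProd (clothes : List (String × String)) :
    solution clothes = kindProd (clothes.map (·.2)) - 1 := by
  unfold solution
  set ks := clothes.map (·.2) with hks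
  have hfold : clothes.foldl
      (fun d p => if d.contains p.2 then d.modify p.2 0 (· + 1) else d.insert p.2 2)
      PySem.Dict.empty = ks.foldl stepA PySem.Dict.empty := by
    rw [hks, List.foldl_map]; rfl
  rw [hfold]
  set D := ks.foldl stepA PySem.Dict.empty with hD
  show D.values.foldl (fun a v => a * v) 1 - 1 = kindProd ks - 1
  have hnd : D.keys.Nodup := by
    refine foldl_stepA_nodup_keys ks PySem.Dict.empty ?_
    rw [PySem.Dict.keys_empty]; exact List.nodup_nil
  have hvals : D.values = D.keys.map (fun k => D.getD k 0) :=
    PySem.Dict.values_eq_map_keys D hnd 0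
  have hfold1 : D.values.foldl (fun a v => a * v) 1 = D.values.prod := by
    rw [List.prod_eq_foldl]
  rw [hfold1, hvals]
  have hkperm : D.keys.Perm (PySem.List.dedup ks) := by
    rw [List.perm_ext_iff_of_nodup hnd (PySem.List.nodup_dedup ks)]
    intro a
    rw [PySem.List.mem_dedup, hD, foldl_stepA_mem_keys, PySem.Dict.keys_empty]
    simp
  rw [(hkperm.map (fun k => D.getD k 0)).prod_eq]
  unfold kindProd
  congr 2
  refine List.map_congr_left (fun a ha => ?_)
  rw [hD, foldl_stepA_getD]
  rw [PySem.Dict.getD_empty, PySem.Dict.contains_empty]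
  have : a ∈ ks := (PySem.List.mem_dedup ks a).mp ha
  simp [this]

-- B's run scan computes kindProd on a sorted list
lemma runScan_eq_kindProd : ∀ (ks : List String), ks.Pairwise (· ≤ ·) →
    runScan ks = kindProd ks := by
  intro ks
  induction ks using runScan.induct with
  | case1 => intro _; simp [runScan, kindProd, PySem.List.dedup]
  | case2 x rest ih =>
    intro hp
    set tw := rest.takeWhile (fun y => y == x) with htw
    set dw := rest.dropWhile (fun y => y == x) with hdw
    have hsplit : tw ++ dw = rest := List.takeWhile_append_dropWhile
    have hrest_pair : rest.Pairwise (· ≤ ·) := (List.pairwise_cons.mp hp).2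
    have hxle : ∀ y ∈ rest, x ≤ y := (List.pairwise_cons.mp hp).1
    have hdw_pair : dw.Pairwise (· ≤ ·) := List.Pairwise.sublist (List.dropWhile_sublist _) hrest_pair
    have htw_all : ∀ y ∈ tw, y = x := by
      intro y hy
      have := List.mem_takeWhile_imp hy
      exact eq_of_beq this
    -- x does not occur after its run
    have hx_not_dw : x ∉ dw := by
      intro hx
      cases hdwc : dw with
      | nil => rw [hdwc] at hx; simp at hx
      | cons z dw' =>
        have heq : rest.dropWhile (fun y => y == x) = z :: dw' := hdw.symm.trans hdwc
        have hz : (z == x) = false := by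
          have h := List.head_dropWhile_not (fun y => y == x) (l := rest)
            (by rw [heq]; simp)
          simpa [heq] using h
        have hzx : z ≠ x := by simpa using hz
        have hzrest : z ∈ rest := (List.dropWhile_sublist _).subset (by rw [heq]; simp)
        have hxz : x ≤ z := hxle z hzrest
        rw [hdwc] at hx
        rcases List.mem_cons.mp hx with h | h
        · exact hzx h.symm
        · have hzle : z ≤ x := by
            have := List.pairwise_cons.mp (by rw [hdwc] at hdw_pair; exact hdw_pair)
            exact this.1 x h
          exact hzx (le_antisymm hzle hxz)
    have htw_count : tw.count x = tw.length := by
      rw [List.count_eq_length]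
      intro y hy
      rw [htw_all y hy]
    have hdw_count_x : dw.count x = 0 := List.count_eq_zero.mpr hx_not_dw
    have hcount_x : (x :: rest).count x = tw.length + 1 := by
      rw [List.count_cons, ← hsplit, List.count_append, htw_count, hdw_count_x]
      simp
    have hcount_ne : ∀ k, k ≠ x → (x :: rest).count k = dw.count k := by
      intro k hk
      have hbk : (x == k) = false := by
        simp [beq_eq_false_iff_ne]; exact fun h => hk h.symm
      rw [List.count_cons, hbk, ← hsplit, List.count_append]
      have : tw.count k = 0 := List.count_eq_zero.mpr (fun hmem => hk (htw_all k hmem))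
      rw [this]; simp
    -- the distinct elements of x :: rest are x followed by those of dw
    have hP : kindProd (x :: rest) =
        ((x :: PySem.List.dedup dw).map (fun k => ((x :: rest).count k : Int) + 1)).prod := by
      refine kindProd_eq_of _ _ ?_ ?_
      · refine List.nodup_cons.mpr ⟨?_, PySem.List.nodup_dedup dw⟩
        rw [PySem.List.mem_dedup]; exact hx_not_dw
      · intro k
        constructor
        · rintro h
          rcases List.mem_cons.mp h with h | h
          · simp [h]
          · have : k ∈ dw := (PySem.List.mem_dedup dw k).mp h
            exact List.mem_cons.mpr (Or.inr (hsplit ▸ List.mem_append.mpr (Or.inr this)))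
        · intro h
          rcases List.mem_cons.mp h with h | h
          · simp [h]
          · rw [← hsplit] at h
            rcases List.mem_append.mp h with h | h
            · simp [htw_all k h]
            · exact List.mem_cons.mpr (Or.inr ((PySem.List.mem_dedup dw k).mpr h))
    have hinner : (PySem.List.dedup dw).map (fun k => ((x :: rest).count k : Int) + 1)
        = (PySem.List.dedup dw).map (fun k => (dw.count k : Int) + 1) := by
      refine List.map_congr_left (fun a ha => ?_)
      have hadw : a ∈ dw := (PySem.List.mem_dedup dw a).mp ha
      have hax : a ≠ x := fun h => hx_not_dw (h ▸ hadw)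
      rw [hcount_ne a hax]
    rw [hP, List.map_cons, List.prod_cons, hinner, hcount_x]
    have hrs : runScan (x :: rest) = ((tw.length : Int) + 2) * runScan dw := by
      rw [runScan]
    rw [hrs, ih hdw_pair]
    unfold kindProd
    push_cast
    ring

lemma solution_alt_eq_kindProd (clothes : List (String × String)) :
    solution_alt clothes = kindProd (clothes.map (·.2)) - 1 := by
  unfold solution_alt
  have hpair : (PySem.List.sorted (clothes.map (·.2)) (fun k => k) false).Pairwise (· ≤ ·) :=
    PySem.List.sorted_pairwise (clothes.map (·.2)) (fun k => k)
  rw [runScan_eq_kindProd _ hpair]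
  rw [kindProd_perm (PySem.List.sorted_perm (clothes.map (·.2)) (fun k => k) false)]

-- ===== VERDICT (by name: the statement is the Claim_ definition above) =====
theorem solution_spec : Claim_equal_solution := by
  intro clothes _
  unfold Spec_solution
  rw [solution_eq_kindProd, solution_alt_eq_kindProd]
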